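-- pv_equiv track=rewrite | github.com/RajSuvariya-InMobi/Bunny-Prisoner-Locating | prac.py | answer
-- ===== SOURCE A (Python) =====
-- def answer(x, y):
--     # your code here
--     a= 1
--     b = x+y-1
--     count = 0
--     for i in range(1,b+1):
--         count +=i
--     count -= (b-a)
--     count += (x-1)
--     return count
-- ===== SOURCE B (Python) =====
-- def answer(x, y):
--     b = x + y - 1
--     tri = b * (b + 1) // 2 if b > 0 else 0
--     return tri - b + x
-- ===== Notes on version B (the rewrite author's own statement) =====
-- stated objective: faster
-- what changed: Replaces the O(x+y) summation loop with the closed-form triangular number b*(b+1)//2.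
import Mathlib
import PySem

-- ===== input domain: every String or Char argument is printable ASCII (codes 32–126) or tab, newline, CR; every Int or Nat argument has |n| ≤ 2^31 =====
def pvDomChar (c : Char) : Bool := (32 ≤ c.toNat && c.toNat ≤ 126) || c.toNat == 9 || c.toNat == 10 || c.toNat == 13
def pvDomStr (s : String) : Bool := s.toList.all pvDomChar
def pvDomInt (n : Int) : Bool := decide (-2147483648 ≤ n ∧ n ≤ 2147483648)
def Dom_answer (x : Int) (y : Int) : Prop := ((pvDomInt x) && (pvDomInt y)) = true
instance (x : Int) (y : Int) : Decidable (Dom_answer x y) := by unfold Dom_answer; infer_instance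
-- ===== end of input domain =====

-- B replaces A's O(x+y) summation loop with the closed-form triangular number b*(b+1)//2 (faster).

-- ===== PORT A =====
def answer (x : Int) (y : Int) : Int :=
  let a : Int := 1
  let b : Int := x + y - 1
  let count : Int := 0
  let count := (PySem.List.pyRange 1 (b + 1) 1).foldl (fun c i => c + i) count
  let count := count - (b - a)
  let count := count + (x - 1)
  count

-- ===== PORT B =====
def answer_alt (x : Int) (y : Int) : Int :=
  let b : Int := x + y - 1
  let tri : Int := if b > 0 then PySem.Int.floordiv (b * (b + 1)) 2 else 0
  tri - b + x

-- ===== PRECONDITION & SPEC =====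
def Spec_answer (x : Int) (y : Int) (out : Int) : Prop := out = answer_alt x y
instance (x : Int) (y : Int) (out : Int) : Decidable (Spec_answer x y out) := by unfold Spec_answer; infer_instance

-- ===== CLAIM (what is proved, stated in full; the proofs are below) =====
def Claim_equal_answer : Prop := ∀ (x : Int) (y : Int), Dom_answer x y → Spec_answer x y (answer x y)

-- ===== LEMMAS AND PROOFS =====
theorem pv_sum_range (n : Nat) :
    (PySem.List.pyRange 1 ((n : Int) + 1) 1).foldl (fun c i => c + i) 0 * 2
      = (n : Int) * ((n : Int) + 1) := by
  induction n with
  | zero => simp [PySem.List.pyRange_one_eq_nil]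
  | succ m ih =>
    have h : PySem.List.pyRange 1 ((↑(m + 1) : Int) + 1) 1
        = PySem.List.pyRange 1 ((m : Int) + 1) 1 ++ [(m : Int) + 1] := by
      have := PySem.List.pyRange_one_succ_right (a := 1) (b := (m : Int) + 1) (by omega)
      push_cast
      push_cast at this
      exact_mod_cast this
    rw [h, List.foldl_append]
    simp only [List.foldl_cons, List.foldl_nil]
    push_cast
    nlinarith [ih]

-- ===== VERDICT (by name: the statement is the Claim_ definition above) =====
theorem answer_spec : Claim_equal_answer := by
  intro x y _
  unfold Spec_answer answer answer_alt
  simp only []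
  set b : Int := x + y - 1 with hb
  by_cases hpos : b > 0
  · have hn : ∃ n : Nat, b = (n : Int) := ⟨b.toNat, by omega⟩
    obtain ⟨n, hbn⟩ := hn
    have hs := pv_sum_range n
    rw [PySem.Int.floordiv_eq_ediv_of_pos (by omega)]
    simp only [if_pos hpos]
    rw [hbn] at *
    omega
  · have hnil : PySem.List.pyRange 1 (b + 1) 1 = [] :=
      PySem.List.pyRange_one_eq_nil (by omega)
    rw [hnil]
    simp [if_neg hpos]
    ring
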